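-- pv_equiv track=rewrite | github.com/ranshiju/Python-for-Tensor-Network-Tutorial | Library/ADQC.py | position_one_layer
-- ===== SOURCE A (Python) =====
-- def position_one_layer(pattern, num_q):
--     pos = list()
--     if pattern == 'stair':
--         for m in range(num_q-1):
--             pos.append([m, m+1])
--     else:  # brick
--         m = 0
--         while m < num_q-1:
--             pos.append([m, m+1])
--             m += 2
--         m = 1
--         while m < num_q-1:
--             pos.append([m, m+1])
--             m += 2
--     return pos
-- ===== SOURCE B (Python) =====
-- def position_one_layer(pattern, num_q):
--     pairs = [[m, m + 1] for m in range(num_q - 1)]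
--     if pattern == 'stair':
--         return pairs
--     return [p for p in pairs if p[0] % 2 == 0] + [p for p in pairs if p[0] % 2 == 1]
-- ===== Notes on version B (the rewrite author's own statement) =====
-- stated objective: simpler
-- what changed: Replaces A's per-pattern loops (a for-loop plus two stepped while-loops) with one linear build of all adjacent pairs followed, for the brick pattern, by an even-then-odd parity partition of that list.
import Mathlib
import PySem

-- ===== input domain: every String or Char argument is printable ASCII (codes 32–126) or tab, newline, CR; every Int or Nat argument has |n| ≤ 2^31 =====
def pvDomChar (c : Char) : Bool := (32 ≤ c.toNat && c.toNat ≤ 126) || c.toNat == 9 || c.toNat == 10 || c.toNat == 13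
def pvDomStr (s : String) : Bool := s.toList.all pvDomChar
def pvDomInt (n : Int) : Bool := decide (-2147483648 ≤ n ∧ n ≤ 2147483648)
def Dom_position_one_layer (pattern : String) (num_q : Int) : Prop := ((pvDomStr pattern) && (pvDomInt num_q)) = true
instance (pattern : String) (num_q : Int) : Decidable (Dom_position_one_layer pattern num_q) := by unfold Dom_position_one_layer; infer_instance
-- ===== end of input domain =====

-- B replaces A's per-pattern loops with one linear pair build plus an even-then-odd parity partition (objective: simpler).

-- ===== PORT A =====
-- A's 'while m < num_q-1: pos.append([m, m+1]); m += 2' loop, with pos the accumulator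
def pvBrickWhile (pos : List (List Int)) (m num_q : Int) : List (List Int) :=
  if m < num_q - 1 then pvBrickWhile (pos ++ [[m, m + 1]]) (m + 2) num_q else pos
termination_by (num_q - 1 - m).toNat
decreasing_by omega

def position_one_layer (pattern : String) (num_q : Int) : List (List Int) :=
  if pattern == "stair" then
    (PySem.List.pyRange 0 (num_q - 1) 1).foldl (fun pos m => pos ++ [[m, m + 1]]) []
  else
    pvBrickWhile (pvBrickWhile [] 0 num_q) 1 num_q

-- ===== PORT B =====
def position_one_layer_alt (pattern : String) (num_q : Int) : List (List Int) :=
  let pairs := (PySem.List.pyRange 0 (num_q - 1) 1).map (fun m => [m, m + 1])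
  if pattern == "stair" then pairs
  else
    -- p[0] is exact here: every p in pairs is a two-element list
    pairs.filter (fun p => PySem.Int.mod (PySem.List.pyGetD p 0 0) 2 == 0)
      ++ pairs.filter (fun p => PySem.Int.mod (PySem.List.pyGetD p 0 0) 2 == 1)

-- ===== PRECONDITION & SPEC =====
def Spec_position_one_layer (pattern : String) (num_q : Int) (out : List (List Int)) : Prop := out = position_one_layer_alt pattern num_q
instance (pattern : String) (num_q : Int) (out : List (List Int)) : Decidable (Spec_position_one_layer pattern num_q out) := by unfold Spec_position_one_layer; infer_instance

-- ===== CLAIM (what is proved, stated in full; the proofs are below) =====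
def Claim_equal_position_one_layer : Prop := ∀ (pattern : String) (num_q : Int), Dom_position_one_layer pattern num_q → Spec_position_one_layer pattern num_q (position_one_layer pattern num_q)

-- ===== LEMMAS AND PROOFS =====

-- the while loop collects exactly the range elements congruent to the start point mod 2
theorem pvBrickWhile_eq (n : Int) : ∀ (s : Int) (pos : List (List Int)),
    pvBrickWhile pos s n =
      pos ++ ((PySem.List.pyRange s (n - 1) 1).filter (fun m => (m - s) % 2 == 0)).map
        (fun m => [m, m + 1]) := by
  intro s pos
  rw [pvBrickWhile]
  split
  · rename_i h
    rw [pvBrickWhile_eq n (s + 2)]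
    by_cases h2 : s + 2 ≤ n - 1
    · have hpre : PySem.List.pyRange s (s + 2) 1 = [s, s + 1] := by
        rw [PySem.List.pyRange_one_cons (by omega : s < s + 2),
          show s + 2 = (s + 1) + 1 by ring, PySem.List.pyRange_one_singleton]
      rw [PySem.List.pyRange_one_append s (s + 2) (n - 1) (by omega) h2, hpre]
      have hc : ((PySem.List.pyRange (s+2) (n-1) 1).filter (fun m => (m - s) % 2 == 0)) =
          ((PySem.List.pyRange (s+2) (n-1) 1).filter (fun m => (m - (s+2)) % 2 == 0)) := by
        apply List.filter_congr
        intro m _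
        have : (m - s) % 2 = (m - (s + 2)) % 2 := by omega
        simp [this]
      simp only [List.nil_append, List.cons_append, List.filter_cons]
      have e1 : ((s - s) % 2 == 0) = true := by simp
      have e2 : ((s + 1 - s) % 2 == 0) = false := by norm_num
      rw [e1, e2, hc]
      simp
    · -- n - 1 = s + 1 : the loop body runs exactly once
      rw [PySem.List.pyRange_one_eq_nil (by omega : n - 1 ≤ s + 2),
        show (n - 1) = s + 1 by omega, PySem.List.pyRange_one_singleton]
      simp
  · rename_i h
    rw [PySem.List.pyRange_one_eq_nil (by omega : n - 1 ≤ s)]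
    simp
termination_by s => (n - 1 - s).toNat
decreasing_by omega

-- [f x] flattening equals plain map (used for A's stair foldl)
theorem pvFlatMapSingleton {α β : Type} (l : List α) (f : α → β) :
    l.flatMap (fun x => [f x]) = l.map f := by
  induction l with
  | nil => rfl
  | cons x xs ih => simp [List.flatMap_cons, ih]

-- reduce B's comprehension filters over the pair list to filters on the range
theorem pvPairFilter (r : List Int) (c : Int) :
    (r.map (fun m => [m, m + 1])).filter
        (fun p => PySem.Int.mod (PySem.List.pyGetD p 0 0) 2 == c) =
      (r.filter (fun m => m % 2 == c)).map (fun m => [m, m + 1]) := by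
  rw [List.filter_map]
  congr 1
  apply List.filter_congr
  intro m _
  have h0 : PySem.List.pyGetD ([m, m + 1] : List Int) 0 0 = m := by
    simp [PySem.List.pyGetD, PySem.List.pyGet?, PySem.List.pyIdx?]
  simp only [Function.comp, h0, PySem.Int.mod_eq_emod_of_pos (by norm_num : (0:Int) < 2)]

-- ===== VERDICT (by name: the statement is the Claim_ definition above) =====
theorem position_one_layer_spec : Claim_equal_position_one_layer := by
  intro pattern n _
  unfold Spec_position_one_layer position_one_layer position_one_layer_alt
  by_cases hp : pattern == "stair"
  · simp only [hp, if_pos]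
    rw [PySem.List.foldl_append_eq_flatMap]
    simp only [List.nil_append]
    exact pvFlatMapSingleton _ _
  · simp only [hp, if_neg, Bool.false_eq_true, not_false_eq_true]
    rw [pvBrickWhile_eq, pvBrickWhile_eq, pvPairFilter, pvPairFilter]
    simp only [List.nil_append]
    congr 1
    · -- even part: (m - 0) % 2 = m % 2
      congr 1
      apply List.filter_congr
      intro m _
      norm_num
    · -- odd part: range from 1 vs range from 0 (0 fails the odd filter)
      by_cases h1 : (0:Int) < n - 1
      · rw [PySem.List.pyRange_one_cons h1, List.filter_cons]
        have e0 : ((0:Int) % 2 == 1) = false := by norm_num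
        rw [e0]
        congr 1
        apply List.filter_congr
        intro m _
        have : ((m - 1) % 2 == 0) = (m % 2 == 1) := by
          have h2 : (m - 1) % 2 = 0 ↔ m % 2 = 1 := by omega
          by_cases hm : m % 2 = 1 <;> simp [hm, h2.mpr, h2]
        exact this
      · rw [PySem.List.pyRange_one_eq_nil (by omega : n - 1 ≤ 1),
          PySem.List.pyRange_one_eq_nil (by omega : n - 1 ≤ 0)]
        rfl
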